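-- pv_equiv track=rewrite | github.com/HARADA1029/shopify-business | ops/monitoring/daily_inspection.py | classify_findings
-- ===== SOURCE A (Python) =====
-- def classify_findings(all_findings):
--     """findings を新4段階で分類"""
--     critical = [f for f in all_findings if f["type"] == "critical"]
--     suggestion = [f for f in all_findings if f["type"] == "suggestion"]
--     medium_term = [f for f in all_findings if f["type"] == "medium_term"]
--     info = [f for f in all_findings if f["type"] == "info"]
--     ok = [f for f in all_findings if f["type"] == "ok"]
--     action = [f for f in all_findings if f["type"] == "action"]
--     return critical, suggestion, medium_term, info, ok, action
-- ===== SOURCE B (Python) =====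
-- def classify_findings(all_findings):
--     """findings を新4段階で分類"""
--     buckets = {t: [] for t in ("critical", "suggestion", "medium_term", "info", "ok", "action")}
--     for f in all_findings:
--         t = f["type"]
--         if t in buckets:
--             buckets[t].append(f)
--     return (buckets["critical"], buckets["suggestion"], buckets["medium_term"],
--             buckets["info"], buckets["ok"], buckets["action"])
-- ===== Notes on version B (the rewrite author's own statement) =====
-- stated objective: faster
-- what changed: Replaces six separate filtering passes over all_findings with one bucketing pass that appends each finding to the list for its type.
import Mathlib
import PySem

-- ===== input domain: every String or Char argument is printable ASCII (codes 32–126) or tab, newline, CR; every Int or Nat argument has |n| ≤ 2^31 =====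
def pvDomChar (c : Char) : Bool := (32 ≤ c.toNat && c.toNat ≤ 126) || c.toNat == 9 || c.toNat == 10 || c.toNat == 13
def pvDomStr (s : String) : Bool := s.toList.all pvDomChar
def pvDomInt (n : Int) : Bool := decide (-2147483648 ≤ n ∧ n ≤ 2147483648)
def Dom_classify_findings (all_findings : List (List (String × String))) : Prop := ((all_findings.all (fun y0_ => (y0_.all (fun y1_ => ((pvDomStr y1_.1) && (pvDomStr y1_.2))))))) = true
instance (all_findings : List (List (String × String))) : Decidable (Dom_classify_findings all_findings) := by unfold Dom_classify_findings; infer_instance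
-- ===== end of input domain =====

-- B replaces six filtering passes with one bucketing pass; equivalence of the return values is proved on inputs where every finding has a "type" key (Python raises KeyError otherwise).

-- ===== PORT A =====
-- f["type"] on an assoc-list dict: first match; none = KeyError (excluded by Pre_).
def pvType? (f : List (String × String)) : Option String :=
  (f.find? (fun p => p.1 == "type")).map (·.2)

def pvIsType (t : String) (f : List (String × String)) : Bool :=
  match pvType? f with
  | some u => u == t
  | none => false

def classify_findings (all_findings : List (List (String × String))) : (List (List (String × String))) × (List (List (String × String))) × (List (List (String × String))) × (List (List (String × String))) × (List (List (String × String))) × (List (List (String × String))) :=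
  let critical := all_findings.filter (pvIsType "critical")
  let suggestion := all_findings.filter (pvIsType "suggestion")
  let medium_term := all_findings.filter (pvIsType "medium_term")
  let info := all_findings.filter (pvIsType "info")
  let ok := all_findings.filter (pvIsType "ok")
  let action := all_findings.filter (pvIsType "action")
  (critical, suggestion, medium_term, info, ok, action)

-- ===== PORT B =====
def pvStep (acc : (List (List (String × String))) × (List (List (String × String))) × (List (List (String × String))) × (List (List (String × String))) × (List (List (String × String))) × (List (List (String × String)))) (f : List (String × String)) : (List (List (String × String))) × (List (List (String × String))) × (List (List (String × String))) × (List (List (String × String))) × (List (List (String × String))) × (List (List (String × String))) :=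
  match pvType? f with
  | none => acc
  | some t =>
    if t == "critical" then (acc.1 ++ [f], acc.2.1, acc.2.2.1, acc.2.2.2.1, acc.2.2.2.2.1, acc.2.2.2.2.2)
    else if t == "suggestion" then (acc.1, acc.2.1 ++ [f], acc.2.2.1, acc.2.2.2.1, acc.2.2.2.2.1, acc.2.2.2.2.2)
    else if t == "medium_term" then (acc.1, acc.2.1, acc.2.2.1 ++ [f], acc.2.2.2.1, acc.2.2.2.2.1, acc.2.2.2.2.2)
    else if t == "info" then (acc.1, acc.2.1, acc.2.2.1, acc.2.2.2.1 ++ [f], acc.2.2.2.2.1, acc.2.2.2.2.2)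
    else if t == "ok" then (acc.1, acc.2.1, acc.2.2.1, acc.2.2.2.1, acc.2.2.2.2.1 ++ [f], acc.2.2.2.2.2)
    else if t == "action" then (acc.1, acc.2.1, acc.2.2.1, acc.2.2.2.1, acc.2.2.2.2.1, acc.2.2.2.2.2 ++ [f])
    else acc

def classify_findings_alt (all_findings : List (List (String × String))) : (List (List (String × String))) × (List (List (String × String))) × (List (List (String × String))) × (List (List (String × String))) × (List (List (String × String))) × (List (List (String × String))) :=
  all_findings.foldl pvStep ([], [], [], [], [], [])

-- ===== PRECONDITION & SPEC =====
-- Pre_ excludes exactly the inputs where some finding lacks a "type" key, on which Python A raises KeyError.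
def Pre_classify_findings (all_findings : List (List (String × String))) : Prop :=
  (all_findings.all (fun f => (f.find? (fun p => p.1 == "type")).isSome)) = true
instance (all_findings : List (List (String × String))) : Decidable (Pre_classify_findings all_findings) := by unfold Pre_classify_findings; infer_instance

def pvWitness_classify_findings : (List (List (String × String))) :=
  [[("type", "critical"), ("msg", "disk")], [("type", "ok")], [("type", "other")]]

def Spec_classify_findings (all_findings : List (List (String × String))) (out : (List (List (String × String))) × (List (List (String × String))) × (List (List (String × String))) × (List (List (String × String))) × (List (List (String × String))) × (List (List (String × String)))) : Prop := out = classify_findings_alt all_findings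
instance (all_findings : List (List (String × String))) (out : (List (List (String × String))) × (List (List (String × String))) × (List (List (String × String))) × (List (List (String × String))) × (List (List (String × String))) × (List (List (String × String)))) : Decidable (Spec_classify_findings all_findings out) := by
  unfold Spec_classify_findings
  have : DecidableEq (List (List (String × String))) := inferInstance
  infer_instance

-- ===== CLAIM (what is proved, stated in full; the proofs are below) =====
def Claim_equal_classify_findings : Prop := ∀ (all_findings : List (List (String × String))), Dom_classify_findings all_findings → Pre_classify_findings all_findings → Spec_classify_findings all_findings (classify_findings all_findings)

-- ===== LEMMAS AND PROOFS =====

-- Invariant of B's single pass: the fold extends each accumulator component by the corresponding filter.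
lemma pvStep_foldl (l : List (List (String × String)))
    (acc : (List (List (String × String))) × (List (List (String × String))) × (List (List (String × String))) × (List (List (String × String))) × (List (List (String × String))) × (List (List (String × String)))) :
    l.foldl pvStep acc =
      (acc.1 ++ l.filter (pvIsType "critical"),
       acc.2.1 ++ l.filter (pvIsType "suggestion"),
       acc.2.2.1 ++ l.filter (pvIsType "medium_term"),
       acc.2.2.2.1 ++ l.filter (pvIsType "info"),
       acc.2.2.2.2.1 ++ l.filter (pvIsType "ok"),
       acc.2.2.2.2.2 ++ l.filter (pvIsType "action")) := by
  induction l generalizing acc with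
  | nil => simp
  | cons f l ih =>
    cases h : pvType? f with
    | none => simp [pvStep, pvIsType, h, ih]
    | some t =>
      simp only [List.foldl_cons, ih, List.filter_cons, pvStep, pvIsType, h]
      by_cases h1 : t = "critical" <;> by_cases h2 : t = "suggestion" <;>
        by_cases h3 : t = "medium_term" <;> by_cases h4 : t = "info" <;>
        by_cases h5 : t = "ok" <;> by_cases h6 : t = "action" <;>
        simp_all

-- ===== VERDICT (by name: the statement is the Claim_ definition above) =====
theorem classify_findings_spec : Claim_equal_classify_findings := by
  intro l _ _
  show classify_findings l = classify_findings_alt l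
  simp [classify_findings, classify_findings_alt, pvStep_foldl]
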